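-- pv_equiv track=rewrite | github.com/mfiloramo/Python-Practice | Practice/challenges.py | vowel_links
-- ===== SOURCE A (Python) =====
-- def vowel_links(text):
--     """
--     Given a sentence as text, return True if any two adjacent words have this property:
--     One word ends with a vowel, while the word immediately after begins with a vowel
--     """
--
--     # Specify a list of all vowel occurrences.
--     vowels = ['A', 'E', 'I', 'O', 'U', 'a', 'e', 'i', 'o', 'u']
--
--     # Add items from text to a list.
--     sentence = []
--     for i in text.split():
--         sentence.append(i)
--
--     # Parse through the split sentence (from the list) and check the index positions
--     # of the last letter of each iteration, as well as the first letter of the subsequent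
--     # iteration. Checks to see if these iterations simultaneously occur as vowels
--     # (checking the vowels list).
--     try:
--         for i in range(len(sentence)):
--             if ((sentence[i])[-1] in vowels) and ((sentence[i+1])[0]) in vowels:
--                 return True
--     except IndexError:
--         pass
--
--     return False
-- ===== SOURCE B (Python) =====
-- def vowel_links(text):
--     """
--     Given a sentence as text, return True if any two adjacent words have this property:
--     One word ends with a vowel, while the word immediately after begins with a vowel
--     """
--     # Single left-to-right scan over the characters, no splitting:
--     # state 0 = nothing pending, 1 = inside a word whose last char so far is a vowel,
--     # 2 = just left a word that ended with a vowel (in whitespace after it).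
--     vowels = 'AEIOUaeiou'
--     state = 0
--     for c in text:
--         if c.isspace():
--             if state == 1:
--                 state = 2
--         elif c in vowels:
--             if state == 2:
--                 return True
--             state = 1
--         else:
--             state = 0
--     return False
-- ===== Notes on version B (the rewrite author's own statement) =====
-- stated objective: alternative
-- what changed: Replaces the split-into-words-then-index-adjacent-pairs loop (with its try/except IndexError) by a single three-state character automaton that scans the text once and never builds a word list.
import Mathlib
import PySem

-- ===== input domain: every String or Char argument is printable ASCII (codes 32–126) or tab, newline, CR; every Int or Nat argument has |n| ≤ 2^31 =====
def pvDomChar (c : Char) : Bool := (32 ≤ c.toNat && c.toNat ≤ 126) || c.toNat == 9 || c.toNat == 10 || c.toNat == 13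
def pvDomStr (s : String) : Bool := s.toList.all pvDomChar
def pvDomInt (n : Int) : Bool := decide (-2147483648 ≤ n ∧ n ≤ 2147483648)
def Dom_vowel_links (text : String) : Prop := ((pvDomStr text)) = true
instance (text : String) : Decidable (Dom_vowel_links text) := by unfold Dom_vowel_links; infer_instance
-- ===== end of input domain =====

-- B replaces A's split-into-words + adjacent-index loop (try/except IndexError) by a
-- single three-state character automaton over the text (alternative decomposition, same O(n) cost).


-- ===== PORT A =====
-- vowels = ['A','E','I','O','U','a','e','i','o','u']
def pvVowelsA : List Char := ['A', 'E', 'I', 'O', 'U', 'a', 'e', 'i', 'o', 'u']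

-- the try/except-wrapped 'for i in range(len(sentence))' loop: the first IndexError
-- (a none from pyGet?) aborts the loop, after which A returns False
def pvLoopA (sentence : List (List Char)) : List Int → Bool
  | [] => false
  | i :: rest =>
    match PySem.List.pyGet? sentence i with
    | none => false                      -- IndexError on sentence[i]
    | some w =>
      match PySem.List.pyGet? w (-1) with
      | none => false                    -- IndexError on (sentence[i])[-1]
      | some cLast =>
        if cLast ∈ pvVowelsA then
          match PySem.List.pyGet? sentence (i + 1) with
          | none => false                -- IndexError on sentence[i+1]
          | some w' =>
            match PySem.List.pyGet? w' 0 with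
            | none => false              -- IndexError on (sentence[i+1])[0]
            | some cFirst =>
              if cFirst ∈ pvVowelsA then true else pvLoopA sentence rest
        else pvLoopA sentence rest

def vowel_links (text : String) : Bool :=
  let sentence := PySem.Chars.split₀ text.toList
  pvLoopA sentence (PySem.List.pyRange 0 sentence.length 1)

-- ===== PORT B =====
def pvVowelsB : List Char := "AEIOUaeiou".toList

-- state 0 = nothing pending, 1 = in a word whose last char so far is a vowel,
-- 2 = in whitespace after a word that ended with a vowel
def pvAuto : List Char → Int → Bool
  | [], _ => false
  | c :: cs, st =>
    if PySem.Chars.isspace c then pvAuto cs (if st == 1 then 2 else st)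
    else if pvVowelsB.contains c then (if st == 2 then true else pvAuto cs 1)
    else pvAuto cs 0

def vowel_links_alt (text : String) : Bool := pvAuto text.toList 0

-- ===== PRECONDITION & SPEC =====
def Spec_vowel_links (text : String) (out : Bool) : Prop := out = vowel_links_alt text
instance (text : String) (out : Bool) : Decidable (Spec_vowel_links text out) := by unfold Spec_vowel_links; infer_instance

-- ===== CLAIM (what is proved, stated in full; the proofs are below) =====
def Claim_equal_vowel_links : Prop := ∀ (text : String), Dom_vowel_links text → Spec_vowel_links text (vowel_links text)

-- ===== LEMMAS AND PROOFS =====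

def pvVowel (c : Char) : Bool := c ∈ pvVowelsA

def pvHeadVowel : List Char → Bool
  | [] => false
  | c :: _ => pvVowel c

def pvOptVowel : Option Char → Bool
  | none => false
  | some c => pvVowel c

-- first word of the list starts with a vowel
def pvFsv : List (List Char) → Bool
  | [] => false
  | w :: _ => pvHeadVowel w

-- some word ends with a vowel and the next word starts with one
def pvAdj : List (List Char) → Bool
  | [] => false
  | w :: ws => (pvHeadVowel w.reverse && pvFsv ws) || pvAdj ws

-- split₀.go with an empty outer accumulator
def pvWords (cs cur : List Char) : List (List Char) := PySem.Chars.split₀.go cs cur []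

theorem pv_contains_eq (c : Char) : pvVowelsB.contains c = pvVowel c := by
  have h : pvVowelsB = pvVowelsA := by decide
  simp [h, pvVowel]

theorem pv_headVowel_eq (l : List Char) : pvHeadVowel l = pvOptVowel l.head? := by
  cases l <;> rfl

theorem pv_go_acc (cs : List Char) : ∀ cur acc,
    PySem.Chars.split₀.go cs cur acc = acc.reverse ++ PySem.Chars.split₀.go cs cur [] := by
  induction cs with
  | nil => intro cur acc; simp [PySem.Chars.split₀.go]; split <;> simp
  | cons c cs ih =>
    intro cur acc
    simp only [PySem.Chars.split₀.go]
    split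
    · split
      · rw [ih [] acc]
      · rw [ih [] (cur.reverse :: acc), ih [] [cur.reverse]]; simp
    · rw [ih (c :: cur) acc]

theorem pv_words_nil (cur : List Char) :
    pvWords [] cur = if cur.isEmpty then [] else [cur.reverse] := by
  simp only [pvWords, PySem.Chars.split₀.go]; split <;> simp

theorem pv_words_cons (c : Char) (cs cur : List Char) :
    pvWords (c :: cs) cur =
      if PySem.Chars.isspace c then
        (if cur.isEmpty then pvWords cs [] else cur.reverse :: pvWords cs [])
      else pvWords cs (c :: cur) := by
  simp only [pvWords, PySem.Chars.split₀.go]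
  split
  · split
    · rfl
    · rw [pv_go_acc cs [] [cur.reverse]]; simp
  · rfl

-- with a nonempty current buffer the first produced word starts with the buffer's last char
theorem pv_fsv_words (cs : List Char) : ∀ cur c,
    ∃ t ws, pvWords cs (cur ++ [c]) = (c :: t) :: ws := by
  induction cs with
  | nil => intro cur c; rw [pv_words_nil]; simp
  | cons d cs ih =>
    intro cur c
    rw [pv_words_cons]
    split
    · have hne : (cur ++ [c]).isEmpty = false := by simp
      rw [hne]
      exact ⟨cur.reverse, pvWords cs [], by simp⟩
    · simpa using ih (d :: cur) c

theorem pv_fsv_single (cs : List Char) (c : Char) : pvFsv (pvWords cs [c]) = pvVowel c := by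
  obtain ⟨t, ws, h⟩ := pv_fsv_words cs [] c
  simp only [List.nil_append] at h
  rw [h]; rfl

-- every produced word is nonempty
theorem pv_words_ne (cs : List Char) : ∀ cur, ∀ w ∈ pvWords cs cur, w ≠ [] := by
  induction cs with
  | nil =>
    intro cur w hw
    rw [pv_words_nil] at hw
    split at hw <;> simp_all
  | cons c cs ih =>
    intro cur w hw
    rw [pv_words_cons] at hw
    split at hw
    · split at hw
      · exact ih [] w hw
      · simp only [List.mem_cons] at hw
        rcases hw with h | h
        · subst h; simp_all
        · exact ih [] w h
    · exact ih (c :: cur) w hw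

-- the automaton computes pvAdj / pvFsv of the words of the remaining text
theorem pv_auto_words (cs : List Char) :
    (∀ cur, pvHeadVowel cur = false → pvAuto cs 0 = pvAdj (pvWords cs cur)) ∧
    (∀ cur, pvHeadVowel cur = true → pvAuto cs 1 = pvAdj (pvWords cs cur)) ∧
    (pvAuto cs 2 = (pvFsv (pvWords cs []) || pvAdj (pvWords cs []))) := by
  induction cs with
  | nil =>
    refine ⟨?_, ?_, ?_⟩
    · intro cur h
      rw [pv_words_nil]
      split
      · rfl
      · simp [pvAuto, pvAdj, pvFsv]
    · intro cur h
      rw [pv_words_nil]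
      cases cur with
      | nil => simp [pvHeadVowel] at h
      | cons a l => simp [pvAuto, pvAdj, pvFsv]
    · simp [pvAuto, pv_words_nil, pvAdj, pvFsv]
  | cons c cs ih =>
    obtain ⟨ih0, ih1, ih2⟩ := ih
    refine ⟨?_, ?_, ?_⟩
    · intro cur h
      rw [pv_words_cons]
      by_cases hs : PySem.Chars.isspace c = true
      · simp only [pvAuto, hs, if_true]
        norm_num
        split
        · exact ih0 [] rfl
        · rw [show pvAdj (cur.reverse :: pvWords cs []) =
              ((pvHeadVowel cur.reverse.reverse && pvFsv (pvWords cs [])) || pvAdj (pvWords cs [])) from rfl]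
          simp [List.reverse_reverse, h, ih0 [] rfl]
      · simp only [pvAuto, hs]
        by_cases hv : pvVowelsB.contains c = true
        · simp only [hv, if_true]
          norm_num
          exact ih1 (c :: cur) (by show pvVowel c = true; rw [← pv_contains_eq]; exact hv)
        · simp only [hv]
          norm_num
          exact ih0 (c :: cur) (by show pvVowel c = false; rw [← pv_contains_eq]; simpa using hv)
    · intro cur h
      rw [pv_words_cons]
      by_cases hs : PySem.Chars.isspace c = true
      · simp only [pvAuto, hs, if_true]
        norm_num
        cases cur with
        | nil => simp [pvHeadVowel] at h
        | cons a l =>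
          rw [if_neg (by simp : ¬ (a :: l = []))]
          rw [show pvAdj ((a :: l).reverse :: pvWords cs []) =
              ((pvHeadVowel (a :: l).reverse.reverse && pvFsv (pvWords cs [])) || pvAdj (pvWords cs [])) from rfl]
          simp only [List.reverse_reverse]
          rw [h, ih2]
          simp
      · simp only [pvAuto, hs]
        by_cases hv : pvVowelsB.contains c = true
        · simp only [hv, if_true]
          norm_num
          exact ih1 (c :: cur) (by show pvVowel c = true; rw [← pv_contains_eq]; exact hv)
        · simp only [hv]
          norm_num
          exact ih0 (c :: cur) (by show pvVowel c = false; rw [← pv_contains_eq]; simpa using hv)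
    · rw [pv_words_cons]
      by_cases hs : PySem.Chars.isspace c = true
      · simp only [pvAuto, hs, if_true]
        norm_num
        exact ih2
      · simp only [pvAuto, hs]
        by_cases hv : pvVowelsB.contains c = true
        · simp only [hv, if_true]
          norm_num
          rw [pv_fsv_single]
          have hvv : pvVowel c = true := by rw [← pv_contains_eq]; exact hv
          simp [hvv]
        · simp only [hv]
          norm_num
          rw [ih0 [c] (by show pvVowel c = false; rw [← pv_contains_eq]; simpa using hv)]
          rw [pv_fsv_single]
          have : pvVowel c = false := by rw [← pv_contains_eq]; simpa using hv
          simp [this]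

theorem pv_pyGet_neg_one {α : Type} (w : List α) : PySem.List.pyGet? w (-1) = w.getLast? := by
  cases w with
  | nil => rfl
  | cons a l =>
    simp only [PySem.List.pyGet?, PySem.List.pyIdx?]
    rw [if_neg (by omega), if_pos (by simp)]
    simp [List.getLast?_eq_getElem?]

theorem pv_pyGet_zero {α : Type} (w : List α) : PySem.List.pyGet? w 0 = w.head? := by
  have := PySem.List.pyGet?_natCast w 0
  simp only [Nat.cast_zero] at this
  rw [this, List.head?_eq_getElem?]

-- A's index loop computes pvAdj on the word list (all words nonempty)
theorem pv_loopA_adj (sentence : List (List Char)) (hne : ∀ w ∈ sentence, w ≠ []) :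
    ∀ k : Nat, pvLoopA sentence (PySem.List.pyRange k sentence.length 1) = pvAdj (sentence.drop k) := by
  suffices h : ∀ n k, sentence.length ≤ k + n →
      pvLoopA sentence (PySem.List.pyRange k sentence.length 1) = pvAdj (sentence.drop k) by
    exact fun k => h sentence.length k (by omega)
  intro n
  induction n with
  | zero =>
    intro k hk
    rw [PySem.List.pyRange_one_eq_nil (by exact_mod_cast hk),
        List.drop_eq_nil_of_le (by omega)]
    rfl
  | succ n ih =>
    intro k hk
    by_cases hlt : k < sentence.length
    · rw [PySem.List.pyRange_one_cons (by exact_mod_cast hlt)]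
      rw [List.drop_eq_getElem_cons hlt]
      have hw : sentence[k] ≠ [] := hne _ (List.getElem_mem hlt)
      have hlast : sentence[k].getLast? = some (sentence[k].getLast hw) :=
        List.getLast?_eq_some_getLast hw
      simp only [pvLoopA]
      rw [show ((k : Int) + 1) = ((k + 1 : Nat) : Int) by push_cast; ring]
      simp only [PySem.List.pyGet?_natCast, List.getElem?_eq_getElem hlt, pv_pyGet_neg_one, hlast]
      by_cases hv : sentence[k].getLast hw ∈ pvVowelsA
      · rw [if_pos hv]
        have e1 : pvHeadVowel sentence[k].reverse = true := by
          rw [pv_headVowel_eq, List.head?_reverse, hlast]; simpa [pvOptVowel, pvVowel] using hv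
        by_cases h2 : k + 1 < sentence.length
        · have hw2 : sentence[k+1] ≠ [] := hne _ (List.getElem_mem h2)
          have hhead : sentence[k+1].head? = some (sentence[k+1].head hw2) :=
            List.head?_eq_some_head hw2
          simp only [List.getElem?_eq_getElem h2, pv_pyGet_zero, hhead]
          have hdrop : sentence.drop (k+1) = sentence[k+1] :: sentence.drop (k+2) :=
            List.drop_eq_getElem_cons h2
          have hfs : pvFsv (List.drop (k+1) sentence) = pvHeadVowel sentence[k+1] := by
            rw [hdrop]; rfl
          have hone : pvAdj (sentence[k] :: List.drop (k+1) sentence) =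
              ((pvHeadVowel sentence[k].reverse && pvFsv (List.drop (k+1) sentence)) ||
                pvAdj (List.drop (k+1) sentence)) := rfl
          by_cases hv2 : sentence[k+1].head hw2 ∈ pvVowelsA
          · rw [if_pos hv2]
            have e2 : pvHeadVowel sentence[k+1] = true := by
              rw [pv_headVowel_eq, hhead]; simpa [pvOptVowel, pvVowel] using hv2
            rw [hone, hfs, e1, e2]
            simp
          · rw [if_neg hv2]
            rw [ih (k+1) (by omega)]
            have e2 : pvHeadVowel sentence[k+1] = false := by
              rw [pv_headVowel_eq, hhead]; simpa [pvOptVowel, pvVowel] using hv2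
            rw [hone, hfs, e2]
            simp
        · simp only [List.getElem?_eq_none (by omega : sentence.length ≤ k + 1)]
          have hdrop : List.drop (k+1) sentence = [] := List.drop_eq_nil_of_le (by omega)
          have hone : pvAdj (sentence[k] :: List.drop (k+1) sentence) =
              ((pvHeadVowel sentence[k].reverse && pvFsv (List.drop (k+1) sentence)) ||
                pvAdj (List.drop (k+1) sentence)) := rfl
          rw [hone, hdrop]
          simp [pvFsv, pvAdj]
      · rw [if_neg hv]
        rw [ih (k+1) (by omega)]
        have e1 : pvHeadVowel sentence[k].reverse = false := by
          rw [pv_headVowel_eq, List.head?_reverse, hlast]; simpa [pvOptVowel, pvVowel] using hv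
        have hone : pvAdj (sentence[k] :: List.drop (k+1) sentence) =
            ((pvHeadVowel sentence[k].reverse && pvFsv (List.drop (k+1) sentence)) ||
              pvAdj (List.drop (k+1) sentence)) := rfl
        rw [hone, e1]
        simp
    · rw [PySem.List.pyRange_one_eq_nil (by exact_mod_cast (by omega : sentence.length ≤ k)),
          List.drop_eq_nil_of_le (by omega)]
      rfl

-- ===== VERDICT (by name: the statement is the Claim_ definition above) =====
theorem vowel_links_spec : Claim_equal_vowel_links := by
  intro text _
  have h1 := pv_loopA_adj (PySem.Chars.split₀ text.toList) (pv_words_ne text.toList []) 0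
  simp only [List.drop_zero, Nat.cast_zero] at h1
  have h2 := (pv_auto_words text.toList).1 [] rfl
  unfold Spec_vowel_links vowel_links vowel_links_alt
  rw [h2]
  exact h1
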